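-- pv_equiv track=rewrite | github.com/saveligulas/advent_of_code | 6_1.py | get_all_times_with_different_button_press_time
-- ===== SOURCE A (Python) =====
-- def get_all_times_with_different_button_press_time(time):
--     results = []
--     for button_press_time in range(time + 1):
--         distance_traveled = 0
--         speed = 0
--         for run_time in range(1, time + 1):
--             if run_time <= button_press_time != 0:
--                 speed += 1
--             else:
--                 distance_traveled += speed
--         results.append(distance_traveled)
--     return results
-- ===== SOURCE B (Python) =====
-- def get_all_times_with_different_button_press_time(time):
--     # closed form: pressing the button for b of `time` units travels b*(time-b)
--     return [b * (time - b) for b in range(time + 1)]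
-- ===== Notes on version B (the rewrite author's own statement) =====
-- stated objective: faster
-- what changed: Replaced the nested simulation loop (per-tick speed/distance update for every press time) by the closed-form distance b*(time-b) computed in one pass.
import Mathlib
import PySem

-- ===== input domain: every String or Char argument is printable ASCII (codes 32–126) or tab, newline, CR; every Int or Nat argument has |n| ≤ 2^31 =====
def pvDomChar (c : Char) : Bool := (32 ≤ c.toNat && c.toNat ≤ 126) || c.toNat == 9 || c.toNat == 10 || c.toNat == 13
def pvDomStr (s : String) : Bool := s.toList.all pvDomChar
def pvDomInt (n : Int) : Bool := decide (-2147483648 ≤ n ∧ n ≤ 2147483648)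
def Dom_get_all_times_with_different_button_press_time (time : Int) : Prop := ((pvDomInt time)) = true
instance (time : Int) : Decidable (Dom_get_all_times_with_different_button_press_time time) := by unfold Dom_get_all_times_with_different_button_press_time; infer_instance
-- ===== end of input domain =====

-- B replaces A's nested per-tick simulation by the closed form b*(time-b) per press time (O(n^2) -> O(n)).


-- ===== PORT A =====
def get_all_times_with_different_button_press_time (time : Int) : List Int :=
  (PySem.List.pyRange 0 (time + 1) 1).foldl (fun results button_press_time =>
    let inner := (PySem.List.pyRange 1 (time + 1) 1).foldl
      (fun (st : Int × Int) run_time =>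
        if run_time ≤ button_press_time ∧ button_press_time ≠ 0 then (st.1, st.2 + 1)
        else (st.1 + st.2, st.2)) ((0 : Int), (0 : Int))
    results ++ [inner.1]) []

-- ===== PORT B =====
def get_all_times_with_different_button_press_time_alt (time : Int) : List Int :=
  (PySem.List.pyRange 0 (time + 1) 1).map (fun b => b * (time - b))

-- ===== PRECONDITION & SPEC =====
def Spec_get_all_times_with_different_button_press_time (time : Int) (out : List Int) : Prop := out = get_all_times_with_different_button_press_time_alt time
instance (time : Int) (out : List Int) : Decidable (Spec_get_all_times_with_different_button_press_time time out) := by unfold Spec_get_all_times_with_different_button_press_time; infer_instance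

-- ===== CLAIM (what is proved, stated in full; the proofs are below) =====
def Claim_equal_get_all_times_with_different_button_press_time : Prop := ∀ (time : Int), Dom_get_all_times_with_different_button_press_time time → Spec_get_all_times_with_different_button_press_time time (get_all_times_with_different_button_press_time time)

-- ===== LEMMAS AND PROOFS =====

-- Inner-loop step function of A
def pvStep (b : Int) (st : Int × Int) (r : Int) : Int × Int :=
  if r ≤ b ∧ b ≠ 0 then (st.1, st.2 + 1) else (st.1 + st.2, st.2)

-- Phase where the condition is always false: each step adds speed to distance
theorem pvAddPhase (b : Int) : ∀ (n : Nat) (a m d s : Int), m - a = n → (b < a ∨ b = 0) →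
    (PySem.List.pyRange a m 1).foldl (pvStep b) (d, s) = (d + s * n, s) := by
  intro n
  induction n with
  | zero =>
    intro a m d s hm _
    rw [PySem.List.pyRange_one_eq_nil (by omega)]
    simp
  | succ k ih =>
    intro a m d s hm hb
    rw [PySem.List.pyRange_one_cons (by omega)]
    simp only [List.foldl_cons]
    have hc : ¬ (a ≤ b ∧ b ≠ 0) := by omega
    rw [show pvStep b (d, s) a = (d + s, s) by simp [pvStep, hc]]
    rw [ih (a + 1) m (d + s) s (by omega) (by omega)]
    simp only [Prod.mk.injEq]
    exact ⟨by push_cast; ring, trivial⟩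

-- Phase where the condition is always true: each step increments speed
theorem pvIncPhase (b : Int) (hb : b ≠ 0) : ∀ (n : Nat) (a d s : Int), (b + 1) - a = n →
    (PySem.List.pyRange a (b + 1) 1).foldl (pvStep b) (d, s) = (d, s + n) := by
  intro n
  induction n with
  | zero =>
    intro a d s hm
    rw [PySem.List.pyRange_one_eq_nil (by omega)]
    simp
  | succ k ih =>
    intro a d s hm
    rw [PySem.List.pyRange_one_cons (by omega)]
    simp only [List.foldl_cons]
    have hc : a ≤ b ∧ b ≠ 0 := ⟨by omega, hb⟩
    rw [show pvStep b (d, s) a = (d, s + 1) by simp [pvStep, hc]]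
    rw [ih (a + 1) d (s + 1) (by omega)]
    simp only [Prod.mk.injEq]
    exact ⟨trivial, by push_cast; ring⟩

-- A's inner loop computes the closed form b*(time-b)
theorem pvInner (time b : Int) (hb0 : 0 ≤ b) (hbt : b ≤ time) :
    ((PySem.List.pyRange 1 (time + 1) 1).foldl (pvStep b) ((0 : Int), (0 : Int))).1
      = b * (time - b) := by
  by_cases h : b = 0
  · subst h
    rw [pvAddPhase 0 time.toNat 1 (time + 1) 0 0 (by omega) (Or.inr rfl)]
    simp
  · rw [PySem.List.pyRange_one_append 1 (b + 1) (time + 1) (by omega) (by omega),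
        List.foldl_append]
    rw [pvIncPhase b h b.toNat 1 0 0 (by omega)]
    rw [pvAddPhase b (time - b).toNat (b + 1) (time + 1) 0 (0 + b.toNat) (by omega) (by omega)]
    have : ((b.toNat : Int)) = b := by omega
    simp only [this, Int.zero_add]
    have h2 : (((time - b).toNat : Int)) = time - b := by omega
    rw [h2]

-- Folding with append equals map when the body agrees with f on members
theorem pvFoldMap (f g : Int → Int) : ∀ (l : List Int) (acc : List Int),
    (∀ x ∈ l, g x = f x) →
    l.foldl (fun res x => res ++ [g x]) acc = acc ++ l.map f := by
  intro l
  induction l with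
  | nil => intro acc _; simp
  | cons x xs ih =>
    intro acc h
    simp only [List.foldl_cons, List.map_cons]
    rw [ih (acc ++ [g x]) (fun y hy => h y (List.mem_cons_of_mem _ hy)),
        h x (List.mem_cons_self)]
    simp

-- ===== VERDICT (by name: the statement is the Claim_ definition above) =====
theorem get_all_times_with_different_button_press_time_spec : Claim_equal_get_all_times_with_different_button_press_time := by
  intro time _
  unfold Spec_get_all_times_with_different_button_press_time
  unfold get_all_times_with_different_button_press_time get_all_times_with_different_button_press_time_alt
  have := pvFoldMap (fun b => b * (time - b))
    (fun b => ((PySem.List.pyRange 1 (time + 1) 1).foldl (pvStep b) ((0 : Int), (0 : Int))).1)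
    (PySem.List.pyRange 0 (time + 1) 1) []
    (by
      intro x hx
      have := (PySem.List.mem_pyRange_one).mp hx
      exact pvInner time x (by omega) (by omega))
  simpa [pvStep] using this
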